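-- pv_equiv track=rewrite | github.com/pablocabanas/repertorium_mir | similarityhybrid.py | gabc_diff_encoding
-- ===== SOURCE A (Python) =====
-- def gabc_diff_encoding(text):
--     """Differencial encoding for gabc.
--     """
--
--     letters = "abcdefghijklmnopqrstuvwxyz"
--     result = []
--     prev_char = None
--     for char in text:
--         if char == ' ':
--             result.append(' ')
--         else:
--             if prev_char is None: # first letter
--                 result.append('')
--             else:
--                 diff = ord(char) - ord(prev_char)
--                 if diff >= 0:
--                     encoded_char = letters[diff % 26]  # Positivos en minúsculas
--                 else:
--                     encoded_char = letters[(-diff) % 26].upper()  # Negativos en mayúsculas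
--                 result.append(encoded_char)
--             prev_char = char
--
--     if len(result) > 1 and result[1] == ' ':
--         result = result[2:]
--     return ''.join(result)
-- ===== SOURCE B (Python) =====
-- def gabc_diff_encoding(text):
--     """Differencial encoding for gabc (pair-diff table + layout pass)."""
--     letters = "abcdefghijklmnopqrstuvwxyz"
--
--     def encode(prev, cur):
--         diff = ord(cur) - ord(prev)
--         if diff >= 0:
--             return letters[diff % 26]
--         return letters[(-diff) % 26].upper()
--
--     chars = [c for c in text if c != ' ']
--     enc = ([''] + [encode(p, c) for p, c in zip(chars, chars[1:])]) if chars else []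
--     it = iter(enc)
--     result = [' ' if c == ' ' else next(it) for c in text]
--     if len(result) > 1 and result[1] == ' ':
--         result = result[2:]
--     return ''.join(result)
-- ===== Notes on version B (the rewrite author's own statement) =====
-- stated objective: alternative
-- what changed: Replaces A's stateful single pass (None-sentinel prev_char carried through the loop) by a precomputed pair-diff encoding table built from zip(chars, chars[1:]) over the space-free character list, plus a separate layout pass that re-inserts spaces by consuming the table through an iterator.
import Mathlib
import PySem

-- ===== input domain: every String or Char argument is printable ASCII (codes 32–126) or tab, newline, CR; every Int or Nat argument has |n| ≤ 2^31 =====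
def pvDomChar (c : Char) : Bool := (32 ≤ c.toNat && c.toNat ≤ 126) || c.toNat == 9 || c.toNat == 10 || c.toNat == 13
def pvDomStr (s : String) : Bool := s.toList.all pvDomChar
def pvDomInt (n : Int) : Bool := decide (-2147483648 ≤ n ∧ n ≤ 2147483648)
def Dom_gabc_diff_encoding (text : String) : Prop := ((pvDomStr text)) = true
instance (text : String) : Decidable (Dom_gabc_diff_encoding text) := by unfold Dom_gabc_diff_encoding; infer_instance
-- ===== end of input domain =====

-- B replaces A's stateful prev_char single pass by a precomputed pair-diff table (zip over the
-- space-free characters) plus a layout pass re-inserting spaces; same cost, different decomposition.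

-- ===== PORT A =====
-- letters = "abcdefghijklmnopqrstuvwxyz"
def pvLetters : List Char := "abcdefghijklmnopqrstuvwxyz".toList

-- the shared tail of both Pythons: the trim of result and ''.join(result)
def pvFinish (result : List String) : String :=
  let result := if 1 < result.length ∧ PySem.List.pyGetD result (1 : Int) "" = " "
                then result.drop 2 else result
  PySem.Str.join "" result

-- loop body of A: state = (result, prev_char)
def pvStepA (st : List String × Option Char) (char : Char) : List String × Option Char :=
  if char = ' ' then (st.1 ++ [" "], st.2)
  else
    match st.2 with
    | none => (st.1 ++ [""], some char)
    | some p =>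
      let diff : Int := (char.toNat : Int) - (p.toNat : Int)
      let e := if diff ≥ 0
               then String.ofList [PySem.List.pyGetD pvLetters (PySem.Int.mod diff 26) 'a']
               else String.ofList [(PySem.List.pyGetD pvLetters (PySem.Int.mod (-diff) 26) 'a').toUpper]
      (st.1 ++ [e], some char)

def gabc_diff_encoding (text : String) : String :=
  pvFinish (text.toList.foldl pvStepA ([], none)).1

-- ===== PORT B =====
-- encode(prev, cur) of Source B (the index is always in [0,25], so pyGetD's default is never used)
def pvEncode (p c : Char) : String :=
  let diff : Int := (c.toNat : Int) - (p.toNat : Int)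
  if diff ≥ 0
  then String.ofList [PySem.List.pyGetD pvLetters (PySem.Int.mod diff 26) 'a']
  else String.ofList [(PySem.List.pyGetD pvLetters (PySem.Int.mod (-diff) 26) 'a').toUpper]

-- enc of Source B: '' followed by the encodings of consecutive pairs of the space-free chars
def pvEncTable (chars : List Char) : List String :=
  if chars = [] then []
  else "" :: (chars.zip chars.tail).map (fun pc => pvEncode pc.1 pc.2)

-- layout pass: state = (result, remaining iterator over enc); next(it) never exhausts the table,
-- so the total stand-in headD ""/tail is exact on every reachable state
def pvStepB (st : List String × List String) (c : Char) : List String × List String :=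
  if c = ' ' then (st.1 ++ [" "], st.2)
  else (st.1 ++ [st.2.headD ""], st.2.tail)

def gabc_diff_encoding_alt (text : String) : String :=
  pvFinish (text.toList.foldl pvStepB
    ([], pvEncTable (text.toList.filter (fun c => c ≠ ' ')))).1

-- ===== PRECONDITION & SPEC =====
def Spec_gabc_diff_encoding (text : String) (out : String) : Prop := out = gabc_diff_encoding_alt text
instance (text : String) (out : String) : Decidable (Spec_gabc_diff_encoding text out) := by unfold Spec_gabc_diff_encoding; infer_instance

-- ===== CLAIM (what is proved, stated in full; the proofs are below) =====
def Claim_equal_gabc_diff_encoding : Prop := ∀ (text : String), Dom_gabc_diff_encoding text → Spec_gabc_diff_encoding text (gabc_diff_encoding text)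

-- ===== LEMMAS AND PROOFS =====

-- the encoding table determined by a pending previous character and the remaining non-space chars
def pvEncFrom : Option Char → List Char → List String
  | _, [] => []
  | none, c :: cs => "" :: pvEncFrom (some c) cs
  | some p, c :: cs => pvEncode p c :: pvEncFrom (some c) cs

theorem pvStepA_space (res : List String) (prev : Option Char) :
    pvStepA (res, prev) ' ' = (res ++ [" "], prev) := by simp [pvStepA]

theorem pvStepB_space (res it : List String) :
    pvStepB (res, it) ' ' = (res ++ [" "], it) := by simp [pvStepB]

theorem pvStepA_none {c : Char} (hc : c ≠ ' ') (res : List String) :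
    pvStepA (res, none) c = (res ++ [""], some c) := by simp [pvStepA, hc]

theorem pvStepA_some {c : Char} (hc : c ≠ ' ') (res : List String) (p : Char) :
    pvStepA (res, some p) c = (res ++ [pvEncode p c], some c) := by
  simp [pvStepA, pvEncode, hc]

theorem pvStepB_cons {c : Char} (hc : c ≠ ' ') (res : List String) (e : String)
    (rest : List String) : pvStepB (res, e :: rest) c = (res ++ [e], rest) := by
  simp [pvStepB, hc]

theorem pvEncFrom_zip (cs : List Char) : ∀ p : Char,
    ((p :: cs).zip cs).map (fun pc => pvEncode pc.1 pc.2) = pvEncFrom (some p) cs := by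
  induction cs with
  | nil => intro p; rfl
  | cons c cs ih =>
    intro p
    show ((p, c) :: ((c :: cs).zip cs)).map (fun pc => pvEncode pc.1 pc.2) = _
    rw [List.map_cons, ih c]; rfl

theorem pvEncTable_eq (cs : List Char) : pvEncTable cs = pvEncFrom none cs := by
  cases cs with
  | nil => rfl
  | cons c cs => simp [pvEncTable, pvEncFrom, pvEncFrom_zip cs c]

theorem pv_inv (l : List Char) : ∀ (res : List String) (prev : Option Char),
    (l.foldl pvStepA (res, prev)).1
      = (l.foldl pvStepB (res, pvEncFrom prev (l.filter (fun c => c ≠ ' ')))).1 := by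
  induction l with
  | nil => intro res prev; rfl
  | cons c l ih =>
    intro res prev
    by_cases hc : c = ' '
    · subst hc
      have hf : (' ' :: l).filter (fun c => c ≠ ' ') = l.filter (fun c => c ≠ ' ') := by simp
      rw [hf, List.foldl_cons, List.foldl_cons, pvStepA_space, pvStepB_space]
      exact ih (res ++ [" "]) prev
    · have hf : (c :: l).filter (fun c => c ≠ ' ') = c :: l.filter (fun c => c ≠ ' ') := by
        simp [hc]
      rw [hf]
      cases prev with
      | none =>
        rw [List.foldl_cons, List.foldl_cons, pvStepA_none hc,
          show pvEncFrom none (c :: l.filter (fun c => c ≠ ' '))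
            = "" :: pvEncFrom (some c) (l.filter (fun c => c ≠ ' ')) from rfl,
          pvStepB_cons hc]
        exact ih (res ++ [""]) (some c)
      | some p =>
        rw [List.foldl_cons, List.foldl_cons, pvStepA_some hc,
          show pvEncFrom (some p) (c :: l.filter (fun c => c ≠ ' '))
            = pvEncode p c :: pvEncFrom (some c) (l.filter (fun c => c ≠ ' ')) from rfl,
          pvStepB_cons hc]
        exact ih (res ++ [pvEncode p c]) (some c)

-- ===== VERDICT (by name: the statement is the Claim_ definition above) =====
theorem gabc_diff_encoding_spec : Claim_equal_gabc_diff_encoding := by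
  intro text _
  show gabc_diff_encoding text = gabc_diff_encoding_alt text
  unfold gabc_diff_encoding gabc_diff_encoding_alt
  rw [pvEncTable_eq, pv_inv text.toList [] none]
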